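-- pv_equiv track=rewrite | github.com/kcharris/AdventOfCode2024 | Day24/answer2.py | findWrongBits
-- ===== SOURCE A (Python) =====
-- def findWrongBits(x, y, z):
--     count = 0
--     wrong_bits = []
--     wire_sum = x + y
--     while z > 0:
--         if z % 2 != wire_sum % 2:
--             wrong_bits.append(count)
--         z //= 2
--         wire_sum //= 2
--         count += 1
--     return wrong_bits[::-1]
-- ===== SOURCE B (Python) =====
-- def findWrongBits(x, y, z):
--     if z <= 0:
--         return []
--     m = ((x + y) % (1 << z.bit_length())) ^ z
--     out = []
--     while m:
--         top = m.bit_length() - 1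
--         out.append(top)
--         m -= 1 << top
--     return out
-- ===== Notes on version B (the rewrite author's own statement) =====
-- stated objective: alternative
-- what changed: Instead of A's dense loop halving z and x+y in parallel and comparing parities at every bit position (then reversing), B builds the XOR mismatch mask of z against the masked wire sum once and then iterates only over its SET bits, repeatedly reading the top set bit with bit_length and clearing it, emitting positions high-to-low with no reversal.
import Mathlib
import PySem

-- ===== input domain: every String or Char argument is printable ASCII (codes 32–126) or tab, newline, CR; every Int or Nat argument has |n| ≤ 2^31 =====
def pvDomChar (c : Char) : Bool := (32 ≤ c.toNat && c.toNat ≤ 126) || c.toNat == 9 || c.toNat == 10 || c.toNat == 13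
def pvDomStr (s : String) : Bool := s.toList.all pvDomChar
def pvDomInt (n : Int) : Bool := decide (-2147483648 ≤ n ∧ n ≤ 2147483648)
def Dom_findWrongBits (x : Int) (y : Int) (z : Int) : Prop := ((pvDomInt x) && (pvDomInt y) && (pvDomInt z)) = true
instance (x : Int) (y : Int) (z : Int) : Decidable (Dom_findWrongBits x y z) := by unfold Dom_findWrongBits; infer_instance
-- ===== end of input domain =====

-- B builds the XOR mismatch mask of z against the masked wire sum once, then extracts only its
-- SET bits, repeatedly taking the top set bit via bit_length and clearing it (emitting
-- high-to-low, no reversal), instead of A's dense loop halving z and x+y in parallel.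

-- ===== PORT A =====
-- the 'while z > 0' loop: state (z, wire_sum, count, wrong_bits); append happens before the halvings
def pvLoopA (z ws count : Int) (acc : List Int) : List Int :=
  if _h : 0 < z then
    pvLoopA (PySem.Int.floordiv z 2) (PySem.Int.floordiv ws 2) (count + 1)
      (if PySem.Int.mod z 2 ≠ PySem.Int.mod ws 2 then acc ++ [count] else acc)
  else acc
termination_by z.toNat
decreasing_by rw [PySem.Int.floordiv_eq_ediv_of_pos (by norm_num : (0:Int) < 2)]; omega

-- wrong_bits[::-1] is exactly the reversed list
def findWrongBits (x : Int) (y : Int) (z : Int) : List Int :=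
  (pvLoopA z (x + y) 0 []).reverse

-- ===== PORT B =====
-- the 'while m' loop: m is a XOR of two nonnegative ints here, so truthiness is '0 < m';
-- each step appends m.bit_length()-1 and subtracts that power of two (clears the top set bit)
def pvLoopB (m : Int) : List Int :=
  if _h : 0 < m then
    ((PySem.Int.bitLength m : Int) - 1) ::
      pvLoopB (m - 1 <<< (PySem.Int.bitLength m - 1))
  else []
termination_by m.toNat
decreasing_by
  have _h1 := PySem.Int.two_pow_bitLength_le m (by omega)
  have h2 : (1 <<< (PySem.Int.bitLength m - 1) : Nat) = 2 ^ (PySem.Int.bitLength m - 1) :=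
    Nat.one_shiftLeft _
  have h3 : (1:Nat) ≤ 2 ^ (PySem.Int.bitLength m - 1) := Nat.one_le_two_pow
  rw [h2]; omega

-- m = ((x + y) % (1 << z.bit_length())) ^ z, then the extraction loop
def findWrongBits_alt (x : Int) (y : Int) (z : Int) : List Int :=
  if z ≤ 0 then []
  else
    pvLoopB (PySem.Int.bxor
      (PySem.Int.mod (x + y) ((1:Int) <<< PySem.Int.bitLength z)) z)

-- ===== PRECONDITION & SPEC =====
def Spec_findWrongBits (x : Int) (y : Int) (z : Int) (out : List Int) : Prop := out = findWrongBits_alt x y z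
instance (x : Int) (y : Int) (z : Int) (out : List Int) : Decidable (Spec_findWrongBits x y z out) := by unfold Spec_findWrongBits; infer_instance

-- ===== CLAIM (what is proved, stated in full; the proofs are below) =====
def Claim_equal_findWrongBits : Prop := ∀ (x : Int) (y : Int) (z : Int), Dom_findWrongBits x y z → Spec_findWrongBits x y z (findWrongBits x y z)

-- ===== LEMMAS AND PROOFS =====

theorem pvXorDiv (m n : Nat) : (m ^^^ n) / 2 = (m / 2) ^^^ (n / 2) := by
  apply Nat.eq_of_testBit_eq; intro i
  simp [Nat.testBit_div_two, Nat.testBit_xor]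

theorem pvXorMod (m n : Nat) : (m ^^^ n) % 2 = (m % 2) ^^^ (n % 2) := by
  have h1 := Nat.testBit_xor m n 0
  simp [Nat.testBit_zero] at h1
  rcases Nat.mod_two_eq_zero_or_one m with h | h <;> rcases Nat.mod_two_eq_zero_or_one n with h' | h' <;>
    simp [h, h'] at h1 ⊢ <;> omega

theorem pvFloordivNeg (k : Nat) : PySem.Int.floordiv (-(k:Int) - 1) 2 = -((k/2 : Nat):Int) - 1 := by
  rw [PySem.Int.floordiv_eq_ediv_of_pos (by norm_num)]; omega

theorem pvFloordivPos (m : Nat) : PySem.Int.floordiv (m:Int) 2 = ((m/2 : Nat):Int) := by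
  rw [PySem.Int.floordiv_eq_ediv_of_pos (by norm_num)]; omega

theorem pvBxorPM (m k : Nat) : PySem.Int.bxor (m:Int) (-(k:Int) - 1) = -((m ^^^ k : Nat):Int) - 1 := by
  unfold PySem.Int.bxor
  rw [if_pos (by positivity), if_neg (by omega)]
  simp

theorem pvBxorMP (j n : Nat) : PySem.Int.bxor (-(j:Int) - 1) (n:Int) = -((j ^^^ n : Nat):Int) - 1 := by
  unfold PySem.Int.bxor
  rw [if_neg (by omega), if_pos (by positivity)]
  simp

theorem pvBxorMM (j k : Nat) : PySem.Int.bxor (-(j:Int) - 1) (-(k:Int) - 1) = ((j ^^^ k : Nat):Int) := by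
  unfold PySem.Int.bxor
  rw [if_neg (by omega), if_neg (by omega)]
  simp

theorem pvX1 (a b : Int) : PySem.Int.floordiv (PySem.Int.bxor a b) 2
    = PySem.Int.bxor (PySem.Int.floordiv a 2) (PySem.Int.floordiv b 2) := by
  rcases le_or_gt 0 a with ha | ha <;> rcases le_or_gt 0 b with hb | hb
  · obtain ⟨m, rfl⟩ : ∃ m : Nat, a = ↑m := ⟨a.toNat, by omega⟩
    obtain ⟨n, rfl⟩ : ∃ n : Nat, b = ↑n := ⟨b.toNat, by omega⟩
    rw [PySem.Int.bxor_natCast, pvFloordivPos, pvFloordivPos, pvFloordivPos,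
        PySem.Int.bxor_natCast, pvXorDiv]
  · obtain ⟨m, rfl⟩ : ∃ m : Nat, a = ↑m := ⟨a.toNat, by omega⟩
    obtain ⟨k, rfl⟩ : ∃ k : Nat, b = -↑k - 1 := ⟨(-b-1).toNat, by omega⟩
    rw [pvBxorPM, pvFloordivNeg, pvFloordivPos, pvFloordivNeg, pvBxorPM, pvXorDiv]
  · obtain ⟨j, rfl⟩ : ∃ j : Nat, a = -↑j - 1 := ⟨(-a-1).toNat, by omega⟩
    obtain ⟨n, rfl⟩ : ∃ n : Nat, b = ↑n := ⟨b.toNat, by omega⟩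
    rw [pvBxorMP, pvFloordivNeg, pvFloordivNeg, pvFloordivPos, pvBxorMP, pvXorDiv]
  · obtain ⟨j, rfl⟩ : ∃ j : Nat, a = -↑j - 1 := ⟨(-a-1).toNat, by omega⟩
    obtain ⟨k, rfl⟩ : ∃ k : Nat, b = -↑k - 1 := ⟨(-b-1).toNat, by omega⟩
    rw [pvBxorMM, pvFloordivPos, pvFloordivNeg, pvFloordivNeg, pvBxorMM, pvXorDiv]

theorem pvX2 (a b : Int) : (PySem.Int.mod (PySem.Int.bxor a b) 2 ≠ 0)
    ↔ (PySem.Int.mod a 2 ≠ PySem.Int.mod b 2) := by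
  rw [PySem.Int.mod_eq_emod_of_pos (by norm_num : (0:Int) < 2),
      PySem.Int.mod_eq_emod_of_pos (by norm_num : (0:Int) < 2),
      PySem.Int.mod_eq_emod_of_pos (by norm_num : (0:Int) < 2)]
  rcases le_or_gt 0 a with ha | ha <;> rcases le_or_gt 0 b with hb | hb
  · obtain ⟨m, rfl⟩ : ∃ m : Nat, a = ↑m := ⟨a.toNat, by omega⟩
    obtain ⟨n, rfl⟩ : ∃ n : Nat, b = ↑n := ⟨b.toNat, by omega⟩
    rw [PySem.Int.bxor_natCast]
    have hq := pvXorMod m n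
    rcases Nat.mod_two_eq_zero_or_one m with hm | hm <;> rcases Nat.mod_two_eq_zero_or_one n with hn | hn <;>
      rw [hm, hn] at hq <;> simp only [Nat.zero_xor, Nat.xor_zero, show (1 ^^^ 1 : Nat) = 0 from rfl, show (0 ^^^ 0 : Nat) = 0 from rfl] at hq <;> omega
  · obtain ⟨m, rfl⟩ : ∃ m : Nat, a = ↑m := ⟨a.toNat, by omega⟩
    obtain ⟨k, rfl⟩ : ∃ k : Nat, b = -↑k - 1 := ⟨(-b-1).toNat, by omega⟩
    rw [pvBxorPM]
    have hq := pvXorMod m k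
    rcases Nat.mod_two_eq_zero_or_one m with hm | hm <;> rcases Nat.mod_two_eq_zero_or_one k with hn | hn <;>
      rw [hm, hn] at hq <;> simp only [Nat.zero_xor, Nat.xor_zero, show (1 ^^^ 1 : Nat) = 0 from rfl, show (0 ^^^ 0 : Nat) = 0 from rfl] at hq <;> omega
  · obtain ⟨j, rfl⟩ : ∃ j : Nat, a = -↑j - 1 := ⟨(-a-1).toNat, by omega⟩
    obtain ⟨n, rfl⟩ : ∃ n : Nat, b = ↑n := ⟨b.toNat, by omega⟩
    rw [pvBxorMP]
    have hq := pvXorMod j n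
    rcases Nat.mod_two_eq_zero_or_one j with hm | hm <;> rcases Nat.mod_two_eq_zero_or_one n with hn | hn <;>
      rw [hm, hn] at hq <;> simp only [Nat.zero_xor, Nat.xor_zero, show (1 ^^^ 1 : Nat) = 0 from rfl, show (0 ^^^ 0 : Nat) = 0 from rfl] at hq <;> omega
  · obtain ⟨j, rfl⟩ : ∃ j : Nat, a = -↑j - 1 := ⟨(-a-1).toNat, by omega⟩
    obtain ⟨k, rfl⟩ : ∃ k : Nat, b = -↑k - 1 := ⟨(-b-1).toNat, by omega⟩
    rw [pvBxorMM]
    have hq := pvXorMod j k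
    rcases Nat.mod_two_eq_zero_or_one j with hm | hm <;> rcases Nat.mod_two_eq_zero_or_one k with hn | hn <;>
      rw [hm, hn] at hq <;> simp only [Nat.zero_xor, Nat.xor_zero, show (1 ^^^ 1 : Nat) = 0 from rfl, show (0 ^^^ 0 : Nat) = 0 from rfl] at hq <;> omega

-- reference list of wrong-bit indices in ascending order, relative indexing from 0
def pvBits (z ws : Int) : List Int :=
  if _h : 0 < z then
    (if PySem.Int.mod z 2 ≠ PySem.Int.mod ws 2 then [(0:Int)] else [])
      ++ (pvBits (PySem.Int.floordiv z 2) (PySem.Int.floordiv ws 2)).map (· + 1)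
  else []
termination_by z.toNat
decreasing_by rw [PySem.Int.floordiv_eq_ediv_of_pos (by norm_num : (0:Int) < 2)]; omega

theorem pvLoopA_eq (z ws : Int) : ∀ (count : Int) (acc : List Int),
    pvLoopA z ws count acc = acc ++ (pvBits z ws).map (fun i => count + i) := by
  induction z, ws using pvBits.induct with
  | case1 z ws h ih =>
    intro count acc
    rw [pvLoopA, pvBits]
    simp only [dif_pos h]
    rw [ih]
    rw [List.map_append, List.map_map]
    have hfe : ((fun i => count + i) ∘ fun x => x + 1) = (fun i => (count + 1) + i) := by
      funext i; simp only [Function.comp]; ring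
    rw [hfe]
    split_ifs with hc
    · simp [List.append_assoc]
    · simp
  | case2 z ws h =>
    intro count acc
    rw [pvLoopA, pvBits]
    simp [h]

theorem pvBitsChar (z ws : Int) : 0 ≤ z →
    pvBits z ws = (List.map (fun k : Nat => (k:Int))
      (List.filter (fun k : Nat => PySem.Int.band (PySem.Int.bxor ws z >>> k) 1 != 0)
        (List.range (PySem.Int.bitLength z)))) := by
  induction z, ws using pvBits.induct with
  | case1 z ws h ih =>
    intro _
    have hz2 : (0:Int) ≤ PySem.Int.floordiv z 2 := by
      rw [PySem.Int.floordiv_eq_ediv_of_pos (by norm_num : (0:Int) < 2)]; omega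
    rw [pvBits]
    simp only [dif_pos h]
    rw [PySem.Int.bitLength_of_pos h, List.range_succ_eq_map, List.filter_cons]
    have hhead : (PySem.Int.band (PySem.Int.bxor ws z >>> (0:Nat)) 1 != 0)
        = decide (PySem.Int.mod z 2 ≠ PySem.Int.mod ws 2) := by
      have h0 : PySem.Int.bxor ws z >>> (0:Nat) = PySem.Int.bxor ws z := by
        simp
      rw [h0, PySem.Int.band_one]
      by_cases hcond : PySem.Int.mod z 2 = PySem.Int.mod ws 2
      · have h1 : PySem.Int.mod (PySem.Int.bxor ws z) 2 = 0 := by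
          by_contra hx; exact ((pvX2 ws z).mp hx) hcond.symm
        rw [h1, hcond]; simp
      · have h1 : PySem.Int.mod (PySem.Int.bxor ws z) 2 ≠ 0 := (pvX2 ws z).mpr (Ne.symm hcond)
        have h2 : decide (PySem.Int.mod z 2 ≠ PySem.Int.mod ws 2) = true := by simpa using hcond
        rw [h2]; simpa using h1
    have htail : ∀ k : Nat, (PySem.Int.band (PySem.Int.bxor ws z >>> (Nat.succ k)) 1 != 0)
        = (PySem.Int.band (PySem.Int.bxor (PySem.Int.floordiv ws 2) (PySem.Int.floordiv z 2) >>> k) 1 != 0) := by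
      intro k
      have hs : PySem.Int.bxor ws z >>> (Nat.succ k)
          = PySem.Int.bxor (PySem.Int.floordiv ws 2) (PySem.Int.floordiv z 2) >>> k := by
        rw [show Nat.succ k = 1 + k from by omega, Int.shiftRight_add, ← pvX1]
        congr 1
        rw [PySem.Int.floordiv_eq_ediv_of_pos (by norm_num : (0:Int) < 2)]
        have := Int.shiftRight_eq_div_pow (PySem.Int.bxor ws z) 1
        simpa using this
      rw [hs]
    rw [ih hz2]
    rw [List.filter_map]
    have hcomp : ((fun k : Nat => PySem.Int.band (PySem.Int.bxor ws z >>> k) 1 != 0) ∘ Nat.succ)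
        = (fun k : Nat => PySem.Int.band (PySem.Int.bxor (PySem.Int.floordiv ws 2) (PySem.Int.floordiv z 2) >>> k) 1 != 0) := by
      funext k; exact htail k
    rw [hcomp, hhead]
    by_cases hcond : PySem.Int.mod z 2 ≠ PySem.Int.mod ws 2
    · rw [if_pos hcond, if_pos (by simpa using hcond)]
      simp [List.map_map, Function.comp]
    · rw [if_neg hcond, if_neg (by simpa using hcond)]
      simp [List.map_map, Function.comp]
  | case2 z ws h =>
    intro hz
    have : z = 0 := by omega
    subst this
    rw [pvBits]
    simp [PySem.Int.bitLength_zero]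

-- ===== B-side lemmas =====

-- shiftRight distributes over Python xor
theorem pvShiftXor (a b : Int) (k : Nat) :
    PySem.Int.bxor a b >>> k = PySem.Int.bxor (a >>> k) (b >>> k) := by
  induction k with
  | zero => simp
  | succ k ih =>
    have hone : ∀ e : Int, e >>> (1:Nat) = PySem.Int.floordiv e 2 := by
      intro e
      rw [PySem.Int.floordiv_eq_ediv_of_pos (by norm_num : (0:Int) < 2)]
      simpa using Int.shiftRight_eq_div_pow e 1
    rw [show k + 1 = k + 1 from rfl, Int.shiftRight_add, Int.shiftRight_add,
        Int.shiftRight_add, ih, hone, hone, hone, pvX1]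

-- on nonnegative M, pvLoopB lists the set bits of M in descending order
theorem pvLoopB_spec (M : Nat) : ∀ n : Nat, M < 2 ^ n →
    pvLoopB (M:Int) = (((List.range n).filter (fun k => M.testBit k)).reverse).map
      (fun k : Nat => (k:Int)) := by
  induction M using Nat.strong_induction_on with
  | _ M ih =>
    intro n hn
    rcases Nat.eq_zero_or_pos M with hM0 | hMpos
    · subst hM0
      rw [pvLoopB]
      simp
    · -- top bit b of M
      set bl := PySem.Int.bitLength (M:Int) with hbl
      have hMne : (M:Int) ≠ 0 := by exact_mod_cast hMpos.ne'
      have hble := PySem.Int.two_pow_bitLength_le (M:Int) hMne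
      have hlt := PySem.Int.lt_two_pow_bitLength (M:Int)
      have hA : 2 ^ (bl - 1) ≤ M := by simpa using hble
      have hB : M < 2 ^ bl := by simpa using hlt
      have hbl1 : 1 ≤ bl := by
        by_contra hc
        have : bl = 0 := by omega
        rw [this] at hB; omega
      set b := bl - 1 with hb
      have hblb : bl = b + 1 := by omega
      have hb2 : M < 2 ^ (b + 1) := by rw [← hblb]; exact hB
      -- the recursive call argument
      have hshift : (1 <<< (bl - 1) : Nat) = 2 ^ b := Nat.one_shiftLeft _
      have hpow1 : (1:Nat) ≤ 2 ^ b := Nat.one_le_two_pow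
      set M' := M - 2 ^ b with hM'
      have harg : (M:Int) - 1 <<< (bl - 1) = ((M' : Nat) : Int) := by
        rw [hshift]; omega
      have hM'lt : M' < M := by omega
      have hM'b : M' < 2 ^ b := by
        have : 2 ^ (b + 1) = 2 * 2 ^ b := by ring
        omega
      have hbn : b < n := by
        rcases Nat.lt_or_ge b n with hgood | hc
        · exact hgood
        · have hle : (2:Nat) ^ n ≤ 2 ^ b := Nat.pow_le_pow_right (by norm_num) hc
          omega
      -- unfold one step of the loop
      rw [pvLoopB]
      rw [dif_pos (by exact_mod_cast hMpos)]
      rw [harg, ih M' hM'lt b hM'b]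
      -- head value
      have hhead : ((bl : Int) - 1) = ((b : Nat) : Int) := by omega
      -- characterize the filter over range n
      have hstable : ∀ m : Nat, b + 1 ≤ m →
          (List.range m).filter (fun k => M.testBit k)
            = (List.range (b+1)).filter (fun k => M.testBit k) := by
        intro m hm
        induction m with
        | zero => omega
        | succ m ihm =>
          rcases Nat.lt_or_ge (b+1) (m+1) with hlt' | hge
          · have hbm : b + 1 ≤ m := by omega
            rw [List.range_succ, List.filter_append, ihm hbm]
            have hfalse : M.testBit m = false :=
              Nat.testBit_lt_two_pow (lt_of_lt_of_le hb2 (Nat.pow_le_pow_right (by norm_num) hbm))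
            simp [hfalse]
          · have : m + 1 = b + 1 := by omega
            rw [this]
      have htop : M.testBit b = true :=
        Nat.testBit_of_two_pow_le_and_two_pow_add_one_gt hA hb2
      have hlow : ∀ k, k < b → M.testBit k = M'.testBit k := by
        intro k hk
        have hmod : M % 2 ^ b = M' := by
          have h1 : M = 2 ^ b + M' := by omega
          rw [h1, Nat.add_mod_left, Nat.mod_eq_of_lt hM'b]
        have := Nat.testBit_mod_two_pow M b k
        rw [hmod] at this
        rw [this, decide_eq_true hk, Bool.true_and]
      have hsplit : (List.range n).filter (fun k => M.testBit k)
          = ((List.range b).filter (fun k => M'.testBit k)) ++ [b] := by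
        rw [hstable n (by omega), List.range_succ, List.filter_append]
        have h1 : (List.range b).filter (fun k => M.testBit k)
            = (List.range b).filter (fun k => M'.testBit k) := by
          apply List.filter_congr
          intro k hk
          exact (hlow k (List.mem_range.mp hk)) ▸ rfl
        simp [h1, htop]
      rw [hsplit]
      simp
      exact hhead

-- the filter predicates of the two characterizations agree below bitLength z
theorem pvPredBridge (ws z : Int) (hz : 0 < z) (k : Nat)
    (hk : k < PySem.Int.bitLength z) :
    (PySem.Int.band (PySem.Int.bxor ws z >>> k) 1 != 0)
      = ((ws % ((2 ^ PySem.Int.bitLength z : Nat) : Int)).toNat ^^^ z.toNat).testBit k := by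
  set n := PySem.Int.bitLength z with hn
  set P : Int := ((2 ^ n : Nat) : Int) with hP
  have hPpos : (0:Int) < P := by positivity
  set t : Int := ws % P with ht
  have ht0 : 0 ≤ t := Int.emod_nonneg ws (by omega)
  set T := t.toNat with hT
  set Z := z.toNat with hZ
  -- left side as a parity statement
  rw [PySem.Int.band_one, pvShiftXor]
  have hx2 := pvX2 (ws >>> k) (z >>> k)
  -- ws >>> k and t >>> k have the same parity (k < n)
  have hws : PySem.Int.mod (ws >>> k) 2 = PySem.Int.mod (t >>> k) 2 := by
    rw [PySem.Int.mod_eq_emod_of_pos (by norm_num : (0:Int) < 2),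
        PySem.Int.mod_eq_emod_of_pos (by norm_num : (0:Int) < 2)]
    have hdecomp : ws = t + P * (ws / P) := by
      have := Int.emod_add_mul_ediv ws P
      omega
    have hsh : ws >>> k = ws / ((2 ^ k : Nat) : Int) := by
      simpa using Int.shiftRight_eq_div_pow ws k
    have hsht : t >>> k = t / ((2 ^ k : Nat) : Int) := by
      simpa using Int.shiftRight_eq_div_pow t k
    rw [hsh, hsht]
    have hPk : P = ((2 ^ k : Nat) : Int) * ((2 ^ (n - k) : Nat) : Int) := by
      rw [hP]; push_cast; rw [← pow_add]; congr 1; omega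
    have hdiv : ws / ((2 ^ k : Nat) : Int)
        = t / ((2 ^ k : Nat) : Int) + ((2 ^ (n - k) : Nat) : Int) * (ws / P) := by
      calc ws / ((2 ^ k : Nat) : Int)
          = (t + ((2 ^ k : Nat) : Int) * (((2 ^ (n - k) : Nat) : Int) * (ws / P)))
              / ((2 ^ k : Nat) : Int) := by rw [← mul_assoc, ← hPk, ← hdecomp]
        _ = t / ((2 ^ k : Nat) : Int) + ((2 ^ (n - k) : Nat) : Int) * (ws / P) := by
            rw [Int.add_mul_ediv_left _ _ (by positivity)]
    rw [hdiv]
    have hnk : 1 ≤ n - k := by omega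
    have heven : ((2 ^ (n - k) : Nat) : Int) * (ws / P) = 2 * (((2 ^ (n - k - 1) : Nat) : Int) * (ws / P)) := by
      push_cast
      rw [← mul_assoc]
      congr 1
      rw [← pow_succ']
      congr 1
      omega
    rw [heven, Int.add_mul_emod_self_left]
  -- Nat parities of T and Z at bit k
  have htk : PySem.Int.mod (t >>> k) 2 = (((T >>> k) % 2 : Nat) : Int) := by
    rw [PySem.Int.mod_eq_emod_of_pos (by norm_num : (0:Int) < 2)]
    have : t = ((T : Nat) : Int) := by omega
    rw [this]
    simp
  have hzk : PySem.Int.mod (z >>> k) 2 = (((Z >>> k) % 2 : Nat) : Int) := by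
    rw [PySem.Int.mod_eq_emod_of_pos (by norm_num : (0:Int) < 2)]
    have : z = ((Z : Nat) : Int) := by omega
    rw [this]
    simp
  have hTbit : T.testBit k = decide ((T >>> k) % 2 = 1) := by
    rw [Nat.testBit_eq_decide_div_mod_eq, Nat.shiftRight_eq_div_pow]
  have hZbit : Z.testBit k = decide ((Z >>> k) % 2 = 1) := by
    rw [Nat.testBit_eq_decide_div_mod_eq, Nat.shiftRight_eq_div_pow]
  rw [Nat.testBit_xor, hTbit, hZbit]
  have hT2 := Nat.mod_two_eq_zero_or_one (T >>> k)
  have hZ2 := Nat.mod_two_eq_zero_or_one (Z >>> k)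
  by_cases hc : PySem.Int.mod (PySem.Int.bxor (ws >>> k) (z >>> k)) 2 = 0
  · have hsame : PySem.Int.mod (ws >>> k) 2 = PySem.Int.mod (z >>> k) 2 := by
      by_contra hd
      exact (hx2.mpr hd) hc
    rw [hws, htk, hzk] at hsame
    have : (T >>> k) % 2 = (Z >>> k) % 2 := by exact_mod_cast hsame
    rw [hc]
    rcases hT2 with h | h <;> rcases hZ2 with h' | h' <;> simp [h, h'] at this ⊢
  · have hdiff : PySem.Int.mod (ws >>> k) 2 ≠ PySem.Int.mod (z >>> k) 2 := hx2.mp hc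
    rw [hws, htk, hzk] at hdiff
    have hne : (T >>> k) % 2 ≠ (Z >>> k) % 2 := by
      intro he; exact hdiff (by exact_mod_cast he)
    have hc' : (PySem.Int.mod (PySem.Int.bxor (ws >>> k) (z >>> k)) 2 != 0) = true := by
      simpa using hc
    rw [hc']
    rcases hT2 with h | h <;> rcases hZ2 with h' | h' <;> simp [h, h'] at hne ⊢

-- ===== VERDICT (by name: the statement is the Claim_ definition above) =====
theorem findWrongBits_spec : Claim_equal_findWrongBits := by
  intro x y z _hd
  unfold Spec_findWrongBits findWrongBits findWrongBits_alt
  by_cases hz : z ≤ 0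
  · rw [if_pos hz, pvLoopA]
    simp [show ¬ (0:Int) < z from by omega]
  · rw [if_neg hz]
    have hz' : 0 < z := by omega
    set ws := x + y with hws
    set n := PySem.Int.bitLength z with hn
    -- A's side: ascending filter, reversed
    rw [pvLoopA_eq z ws 0 []]
    simp only [List.nil_append, zero_add, List.map_id']
    rw [pvBitsChar z ws (by omega)]
    -- B's side: rewrite the mask to the Nat xor value
    have hPshift : (1:Int) <<< n = ((2 ^ n : Nat) : Int) := by
      simp [Int.shiftLeft_eq]
    have hPpos : (0:Int) < ((2 ^ n : Nat) : Int) := by positivity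
    set t : Int := ws % ((2 ^ n : Nat) : Int) with ht
    have ht0 : 0 ≤ t := Int.emod_nonneg ws (by omega)
    have htlt : t < ((2 ^ n : Nat) : Int) := Int.emod_lt_of_pos ws hPpos
    set T := t.toNat with hT
    set Z := z.toNat with hZ
    have hmask : PySem.Int.bxor (PySem.Int.mod ws ((1:Int) <<< n)) z = (((T ^^^ Z : Nat)) : Int) := by
      rw [hPshift, PySem.Int.mod_eq_emod_of_pos hPpos, ← ht]
      have h1 : t = ((T : Nat) : Int) := by omega
      have h2 : z = ((Z : Nat) : Int) := by omega
      rw [h1, h2, PySem.Int.bxor_natCast]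
    rw [hmask]
    have hTn : T < 2 ^ n := by omega
    have hZn : Z < 2 ^ n := by
      rw [hn, hZ]
      have := PySem.Int.lt_two_pow_bitLength z
      omega
    rw [pvLoopB_spec (T ^^^ Z) n (Nat.xor_lt_two_pow hTn hZn)]
    -- the two filters agree
    have hfilt : (List.range n).filter
          (fun k : Nat => PySem.Int.band (PySem.Int.bxor ws z >>> k) 1 != 0)
        = (List.range n).filter (fun k : Nat => (T ^^^ Z).testBit k) := by
      apply List.filter_congr
      intro k hk
      have hbr := pvPredBridge ws z hz' k (by rw [← hn]; exact List.mem_range.mp hk)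
      rw [← hn] at hbr
      exact hbr
    rw [hfilt, ← List.map_reverse]
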